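-- pv_equiv track=rewrite | github.com/samuelarnesen/board-games | contract_game/extra/test_bid.py | find_best_response
-- ===== SOURCE A (Python) =====
-- def find_differential(curve, their_curve, bet, their_bet, contract):
-- 	base_price = contract[0] - (contract[1] * (bet + their_bet))
--
-- 	their_cost = sum(their_curve[0:their_bet + 1])
-- 	their_profit = (base_price * their_bet) - their_cost
--
-- 	my_cost = sum(curve[0:bet+1])
-- 	my_profit = (base_price * bet) - my_cost
--
-- 	return my_profit - their_profit
--
-- def find_best_response(curve, their_curve, their_bet, contract):
-- 	best_bet = -1
-- 	best_differential = float("-inf")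
-- 	for bet in range(len(curve)):
-- 		differential = find_differential(curve, their_curve, bet, their_bet, contract)
-- 		best_differential = max(best_differential, differential)
-- 		best_bet = bet if best_differential == differential else best_bet
-- 	return best_bet
-- ===== SOURCE B (Python) =====
-- def find_best_response(curve, their_curve, their_bet, contract):
--     best_bet = -1
--     best_diff = None
--     their_cost = sum(their_curve[0:their_bet + 1])
--     running = 0
--     for bet, price in enumerate(curve):
--         running += price
--         base = contract[0] - contract[1] * (bet + their_bet)
--         diff = base * (bet - their_bet) - running + their_cost
--         if best_diff is None or diff >= best_diff:
--             best_bet = bet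
--             best_diff = diff
--     return best_bet
-- ===== Notes on version B (the rewrite author's own statement) =====
-- stated objective: faster
-- what changed: B replaces A's per-bet re-summation of curve[0:bet+1] (a slice-and-sum inside the loop) by a single pass over enumerate(curve) that maintains a running prefix sum and computes each differential in O(1) from it, keeping the last-maximal bet.
import Mathlib
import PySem

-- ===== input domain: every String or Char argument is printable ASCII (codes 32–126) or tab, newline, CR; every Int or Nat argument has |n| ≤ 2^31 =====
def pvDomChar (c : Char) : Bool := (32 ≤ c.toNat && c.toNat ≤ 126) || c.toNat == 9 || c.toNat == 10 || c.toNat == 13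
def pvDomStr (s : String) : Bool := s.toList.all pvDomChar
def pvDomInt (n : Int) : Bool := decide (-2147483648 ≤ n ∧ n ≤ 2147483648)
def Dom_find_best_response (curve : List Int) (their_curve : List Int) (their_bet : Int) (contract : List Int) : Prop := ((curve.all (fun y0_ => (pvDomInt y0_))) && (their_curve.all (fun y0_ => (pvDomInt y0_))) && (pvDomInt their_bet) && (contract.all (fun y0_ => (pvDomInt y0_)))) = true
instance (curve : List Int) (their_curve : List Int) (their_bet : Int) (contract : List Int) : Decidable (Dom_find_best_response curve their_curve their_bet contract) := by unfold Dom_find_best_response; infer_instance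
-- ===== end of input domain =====

-- B replaces A's per-bet slice-and-sum scan (O(n^2)) with a single pass keeping a running
-- prefix sum and the last-maximal differential (objective: faster, asymptotic).

-- ===== PORT A =====
def find_differential (curve : List Int) (their_curve : List Int) (bet : Int) (their_bet : Int) (contract : List Int) : Int :=
  let base_price := PySem.List.pyGetD contract 0 0 - (PySem.List.pyGetD contract 1 0 * (bet + their_bet))
  let their_cost := (PySem.List.slice their_curve (some 0) (some (their_bet + 1))).sum
  let their_profit := (base_price * their_bet) - their_cost
  let my_cost := (PySem.List.slice curve (some 0) (some (bet + 1))).sum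
  let my_profit := (base_price * bet) - my_cost
  my_profit - their_profit

-- best_differential starts as float("-inf"): modelled as Option Int with none = -inf
def find_best_response (curve : List Int) (their_curve : List Int) (their_bet : Int) (contract : List Int) : Int :=
  let st := (PySem.List.pyRange 0 (curve.length : Int) 1).foldl
    (fun (st : Int × Option Int) bet =>
      let differential := find_differential curve their_curve bet their_bet contract
      let best : Int := match st.2 with | none => differential | some m => max m differential
      (if best = differential then bet else st.1, some best))
    (-1, none)
  st.1

-- ===== PORT B =====
def find_best_response_alt (curve : List Int) (their_curve : List Int) (their_bet : Int) (contract : List Int) : Int :=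
  let their_cost := (PySem.List.slice their_curve (some 0) (some (their_bet + 1))).sum
  let st := (PySem.List.enumerate curve 0).foldl
    (fun (st : Int × Option Int × Int) p =>
      let running := st.2.2 + p.2
      let base := PySem.List.pyGetD contract 0 0 - PySem.List.pyGetD contract 1 0 * (p.1 + their_bet)
      let diff := base * (p.1 - their_bet) - running + their_cost
      match st.2.1 with
      | none => (p.1, some diff, running)
      | some m => if diff ≥ m then (p.1, some diff, running) else (st.1, some m, running))
    (-1, none, 0)
  st.1

-- ===== PRECONDITION & SPEC =====
-- Pre_ excludes only inputs where Python A raises IndexError: a nonempty curve with a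
-- contract of fewer than two entries (both A and B index contract[0] and contract[1] then).
def Pre_find_best_response (curve : List Int) (their_curve : List Int) (their_bet : Int) (contract : List Int) : Prop :=
  curve = [] ∨ 2 ≤ contract.length
instance (curve : List Int) (their_curve : List Int) (their_bet : Int) (contract : List Int) : Decidable (Pre_find_best_response curve their_curve their_bet contract) := by unfold Pre_find_best_response; infer_instance

def pvWitness_find_best_response : List Int × List Int × Int × List Int := ([1, 2], [1], 0, [10, 1])

def Spec_find_best_response (curve : List Int) (their_curve : List Int) (their_bet : Int) (contract : List Int) (out : Int) : Prop := out = find_best_response_alt curve their_curve their_bet contract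
instance (curve : List Int) (their_curve : List Int) (their_bet : Int) (contract : List Int) (out : Int) : Decidable (Spec_find_best_response curve their_curve their_bet contract out) := by unfold Spec_find_best_response; infer_instance

-- ===== CLAIM (what is proved, stated in full; the proofs are below) =====
def Claim_equal_find_best_response : Prop := ∀ (curve : List Int) (their_curve : List Int) (their_bet : Int) (contract : List Int), Dom_find_best_response curve their_curve their_bet contract → Pre_find_best_response curve their_curve their_bet contract → Spec_find_best_response curve their_curve their_bet contract (find_best_response curve their_curve their_bet contract)

-- ===== LEMMAS AND PROOFS =====

-- The two loop bodies, as standalone step functions (definitionally those of the ports).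
def stepA (curve their_curve : List Int) (their_bet : Int) (contract : List Int)
    (st : Int × Option Int) (bet : Int) : Int × Option Int :=
  let differential := find_differential curve their_curve bet their_bet contract
  let best : Int := match st.2 with | none => differential | some m => max m differential
  (if best = differential then bet else st.1, some best)

-- their_cost helper used only to state stepB compactly
def their_cost (their_curve : List Int) (their_bet : Int) : Int :=
  (PySem.List.slice their_curve (some 0) (some (their_bet + 1))).sum

def stepB (their_curve : List Int) (their_bet : Int) (contract : List Int)
    (st : Int × Option Int × Int) (p : Int × Int) : Int × Option Int × Int :=
  let running := st.2.2 + p.2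
  let base := PySem.List.pyGetD contract 0 0 - PySem.List.pyGetD contract 1 0 * (p.1 + their_bet)
  let diff := base * (p.1 - their_bet) - running + their_cost their_curve their_bet
  match st.2.1 with
  | none => (p.1, some diff, running)
  | some m => if diff ≥ m then (p.1, some diff, running) else (st.1, some m, running)

theorem main_loop (their_curve : List Int) (their_bet : Int) (contract : List Int) :
    ∀ (suffix pre : List Int) (bb : Int) (bd : Option Int),
    (PySem.List.pyRange (pre.length : Int) ((pre.length : Int) + (suffix.length : Int)) 1).foldl
      (stepA (pre ++ suffix) their_curve their_bet contract) (bb, bd)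
    = (((PySem.List.enumerate suffix (pre.length : Int)).foldl
        (stepB their_curve their_bet contract) (bb, bd, pre.sum)).1,
       ((PySem.List.enumerate suffix (pre.length : Int)).foldl
        (stepB their_curve their_bet contract) (bb, bd, pre.sum)).2.1) := by
  intro suffix
  induction suffix with
  | nil =>
    intro pre bb bd
    rw [PySem.List.pyRange_one_eq_nil (by simp)]
    simp [PySem.List.enumerate]
  | cons x xs ih =>
    intro pre bb bd
    rw [PySem.List.pyRange_one_cons (by simp), PySem.List.enumerate_cons]
    simp only [List.foldl_cons]
    have hstep : stepA (pre ++ x :: xs) their_curve their_bet contract (bb, bd) (pre.length : Int)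
        = (((stepB their_curve their_bet contract (bb, bd, pre.sum) ((pre.length : Int), x)).1),
           ((stepB their_curve their_bet contract (bb, bd, pre.sum) ((pre.length : Int), x)).2.1)) := by
      have hslice : PySem.List.slice (pre ++ x :: xs) (some 0) (some ((pre.length : Int) + 1))
          = pre ++ [x] := by
        have h1 : ((pre.length : Int) + 1) = ((pre.length + 1 : Nat) : Int) := by push_cast; ring
        rw [h1, PySem.List.slice_zero_start, PySem.List.slice_to_natCast]
        rw [show pre ++ x :: xs = (pre ++ [x]) ++ xs by simp]
        rw [List.take_append_of_le_length (by simp)]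
        simp
      unfold stepA stepB find_differential their_cost
      rw [hslice]
      simp only [List.sum_append, List.sum_cons, List.sum_nil]
      cases bd with
      | none =>
        dsimp only
        rw [if_pos rfl]
        simp only [Prod.mk.injEq, Option.some.injEq]
        exact ⟨trivial, by ring⟩
      | some m =>
        dsimp only
        have harith : (PySem.List.pyGetD contract 0 0 - PySem.List.pyGetD contract 1 0 * ((pre.length : Int) + their_bet)) * (pre.length : Int) -
              (pre.sum + (x + 0)) -
              ((PySem.List.pyGetD contract 0 0 - PySem.List.pyGetD contract 1 0 * ((pre.length : Int) + their_bet)) * their_bet -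
                (PySem.List.slice their_curve (some 0) (some (their_bet + 1))).sum)
            = (PySem.List.pyGetD contract 0 0 - PySem.List.pyGetD contract 1 0 * ((pre.length : Int) + their_bet)) * ((pre.length : Int) - their_bet) -
              (pre.sum + x) + (PySem.List.slice their_curve (some 0) (some (their_bet + 1))).sum := by ring
        rw [harith]
        set d := (PySem.List.pyGetD contract 0 0 - PySem.List.pyGetD contract 1 0 * ((pre.length : Int) + their_bet)) * ((pre.length : Int) - their_bet) -
              (pre.sum + x) + (PySem.List.slice their_curve (some 0) (some (their_bet + 1))).sum with hd
        by_cases hge : d ≥ m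
        · rw [if_pos hge, if_pos (by omega : max m d = d)]
          exact congrArg (Prod.mk _) (congrArg some (by omega))
        · rw [if_neg hge, if_neg (by omega : ¬ max m d = d)]
          exact congrArg (Prod.mk bb) (congrArg some (by omega))
    have hlen : ((pre.length : Int) + ((x :: xs).length : Int)) = (((pre ++ [x]).length : Int) + (xs.length : Int)) := by
      simp; ring
    have hlen1 : (pre.length : Int) + 1 = ((pre ++ [x]).length : Int) := by simp
    rw [hstep, hlen, hlen1, show pre ++ x :: xs = (pre ++ [x]) ++ xs by simp]
    have h22 : (stepB their_curve their_bet contract (bb, bd, pre.sum) ((pre.length : Int), x)).2.2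
        = (pre ++ [x]).sum := by
      unfold stepB
      cases bd with
      | none => simp
      | some m => dsimp only []; split_ifs <;> simp
    rw [show stepB their_curve their_bet contract (bb, bd, pre.sum) ((pre.length : Int), x)
        = ((stepB their_curve their_bet contract (bb, bd, pre.sum) ((pre.length : Int), x)).1,
           (stepB their_curve their_bet contract (bb, bd, pre.sum) ((pre.length : Int), x)).2.1,
           (pre ++ [x]).sum) from by rw [← h22]]
    exact ih (pre ++ [x]) _ _

-- ===== VERDICT (by name: the statement is the Claim_ definition above) =====
theorem find_best_response_spec : Claim_equal_find_best_response := by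
  intro curve their_curve their_bet contract _ _
  unfold Spec_find_best_response find_best_response find_best_response_alt
  have h := main_loop their_curve their_bet contract curve [] (-1) none
  simp only [List.nil_append, List.length_nil, Int.natCast_zero, zero_add, List.sum_nil] at h
  show ((PySem.List.pyRange 0 (curve.length : Int) 1).foldl
      (stepA curve their_curve their_bet contract) (-1, none)).1 = _
  rw [h]
  rfl
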